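-- pv_equiv track=rewrite | github.com/watervin/programmers | 7월/k번째수.py | solution
-- ===== SOURCE A (Python) =====
-- def solution(array, commands):
--
--     new_list = []
--     answer = []
--
--
--     for command in commands:
--         new_list = array[command[0]-1: command[1]]
--         new_list.sort()
--         answer.append(new_list[command[2]-1])
--
--
--
--     return answer
-- ===== SOURCE B (Python) =====
-- import heapq
--
--
-- def solution(array, commands):
--     # Partial selection: take the k smallest elements of the slice with a
--     # bounded heap and answer with the largest of them.
--     return [heapq.nsmallest(c[2], array[c[0] - 1:c[1]])[-1] for c in commands]
-- ===== Notes on version B (the rewrite author's own statement) =====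
-- stated objective: alternative
-- what changed: Replaces the full sort of each slice plus positional indexing by a bounded-heap partial selection (heapq.nsmallest) whose last element is the k-th smallest, collected with a list comprehension instead of an accumulator loop.
-- outside the precondition, e.g. on solution([1, 2, 3], [[1, 3, 0]]): A returns [3], B raises IndexError
import Mathlib
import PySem

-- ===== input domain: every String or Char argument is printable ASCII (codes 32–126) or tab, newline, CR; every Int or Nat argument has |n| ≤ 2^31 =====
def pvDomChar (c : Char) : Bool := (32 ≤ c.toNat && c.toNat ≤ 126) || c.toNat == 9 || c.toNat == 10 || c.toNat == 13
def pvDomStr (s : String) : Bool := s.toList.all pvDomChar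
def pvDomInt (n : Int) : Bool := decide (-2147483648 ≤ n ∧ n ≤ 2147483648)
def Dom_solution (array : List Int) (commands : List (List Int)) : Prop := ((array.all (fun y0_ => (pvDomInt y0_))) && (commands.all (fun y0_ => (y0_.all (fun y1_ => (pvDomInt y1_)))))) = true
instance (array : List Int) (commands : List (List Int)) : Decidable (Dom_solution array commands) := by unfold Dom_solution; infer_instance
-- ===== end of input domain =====

-- B replaces the per-command full sort + positional index by a partial selection
-- (heapq.nsmallest, ported as take-of-sorted) whose last element is the answer.


-- ===== PORT A =====
def solution (array : List Int) (commands : List (List Int)) : List Int :=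
  commands.foldl (fun answer command =>
    let new_list := PySem.List.slice array (some (PySem.List.pyGetD command 0 0 - 1)) (some (PySem.List.pyGetD command 1 0))
    let new_list := PySem.List.sorted new_list (fun x => x) false
    answer ++ [PySem.List.pyGetD new_list (PySem.List.pyGetD command 2 0 - 1) 0]) []

-- ===== PORT B =====
-- heapq.nsmallest k xs: the k smallest elements in ascending order = first k of the sorted list
-- (k ≤ 0 gives [], matching Python); exact on every admitted input.
def nsmallest (k : Int) (xs : List Int) : List Int :=
  (PySem.List.sorted xs (fun x => x) false).take k.toNat

def solution_alt (array : List Int) (commands : List (List Int)) : List Int :=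
  commands.map (fun c =>
    PySem.List.pyGetD
      (nsmallest (PySem.List.pyGetD c 2 0)
        (PySem.List.slice array (some (PySem.List.pyGetD c 0 0 - 1)) (some (PySem.List.pyGetD c 1 0))))
      (-1) 0)

-- ===== PRECONDITION & SPEC =====
-- Pre_ excludes commands shorter than 3 entries or whose k lies outside 1..len(slice): there A
-- raises IndexError, except when k ≤ 0 and the negative index k-1 wraps into the sorted slice —
-- an accident of Python negative indexing on which B's heap selection (nsmallest of a
-- nonpositive count is empty) raises instead.
def Pre_solution (array : List Int) (commands : List (List Int)) : Prop :=
  ∀ c ∈ commands, 3 ≤ c.length ∧ 1 ≤ PySem.List.pyGetD c 2 0 ∧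
    PySem.List.pyGetD c 2 0 ≤
      ((PySem.List.slice array (some (PySem.List.pyGetD c 0 0 - 1)) (some (PySem.List.pyGetD c 1 0))).length : Int)
instance (array : List Int) (commands : List (List Int)) : Decidable (Pre_solution array commands) := by
  unfold Pre_solution; infer_instance

def pvWitness_solution : List Int × List (List Int) :=
  ([3, 2, 0], [[1, 3, 3]])

def Spec_solution (array : List Int) (commands : List (List Int)) (out : List Int) : Prop := out = solution_alt array commands
instance (array : List Int) (commands : List (List Int)) (out : List Int) : Decidable (Spec_solution array commands out) := by unfold Spec_solution; infer_instance

-- ===== CLAIM (what is proved, stated in full; the proofs are below) =====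
def Claim_equal_solution : Prop := ∀ (array : List Int) (commands : List (List Int)), Dom_solution array commands → Pre_solution array commands → Spec_solution array commands (solution array commands)

-- ===== LEMMAS AND PROOFS =====

-- The last of the first k of a list is its (k-1)-st element.
theorem pyGetD_take_neg_one (l : List Int) (k : Int) (h1 : 1 ≤ k) (h2 : k ≤ (l.length : Int)) :
    PySem.List.pyGetD (l.take k.toNat) (-1) 0 = PySem.List.pyGetD l (k - 1) 0 := by
  have hk1 : 1 ≤ k.toNat := by omega
  have hk2 : k.toNat ≤ l.length := by omega
  have hlen : (l.take k.toNat).length = k.toNat := by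
    rw [List.length_take]; omega
  have hne : l.take k.toNat ≠ [] := by
    intro h; rw [h] at hlen; simp at hlen; omega
  rw [PySem.List.pyGetD_neg_one _ _ hne,
      PySem.List.pyGetD_eq_getElem l 0 (by omega) (by omega),
      List.getLast_eq_getElem]
  have hidx : (k - 1).toNat = k.toNat - 1 := by omega
  simp only [hlen, hidx, List.getElem_take]

-- ===== VERDICT (by name: the statement is the Claim_ definition above) =====
theorem solution_spec : Claim_equal_solution := by
  intro array commands _ hpre
  unfold Spec_solution solution solution_alt
  rw [PySem.List.foldl_append_singleton_eq_map]
  apply List.map_congr_left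
  intro c hc
  obtain ⟨-, h1, h2⟩ := hpre c hc
  simp only [nsmallest]
  rw [pyGetD_take_neg_one]
  · omega
  · rw [PySem.List.length_sorted]; exact h2
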